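-- pv_equiv track=rewrite | github.com/OmriKad/Into-To-CS-BGU | python 1st semester HW backup/hw3/hw3.py | split_text_to_tokens
-- ===== SOURCE A (Python) =====
-- def split_text_to_tokens(text):
--     '''
--     This function eliminates unwanted characters in a given text.
--     :param text: (str) A text with unwanted characters.
--     :return: (lst) A list with the clean words of the original text in their order.
--     '''
--     final_lst = []
--     tmp_str = ''
--     for i in text:
--         # The ASCII decimal for space key. This way we can know when a word ended.
--         if ord(i) == 32:
--             final_lst.append(tmp_str)
--             tmp_str = ''
--             continue
--         # Deals with the wanted characters.
--         elif 65 <= ord(i) <= 90 or 97 <= ord(i) <= 122: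
--             tmp_str = tmp_str + i
--     final_lst.append(tmp_str)
--     # In the cases of unwanted indexes as "space", this removes them.
--     while '' in final_lst:
--         final_lst.remove('')
--     return final_lst
-- ===== SOURCE B (Python) =====
-- def split_text_to_tokens(text):
--     result = []
--     for seg in text.split(' '):
--         token = ''.join(c for c in seg if 65 <= ord(c) <= 90 or 97 <= ord(c) <= 122)
--         if token:
--             result.append(token)
--     return result
-- ===== Notes on version B (the rewrite author's own statement) =====
-- stated objective: simpler
-- what changed: Replaces A's fused char-by-char state machine plus a while-remove cleanup pass for empty tokens with split-on-space, per-segment ASCII-letter filtering, and appending only non-empty tokens.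
import Mathlib
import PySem

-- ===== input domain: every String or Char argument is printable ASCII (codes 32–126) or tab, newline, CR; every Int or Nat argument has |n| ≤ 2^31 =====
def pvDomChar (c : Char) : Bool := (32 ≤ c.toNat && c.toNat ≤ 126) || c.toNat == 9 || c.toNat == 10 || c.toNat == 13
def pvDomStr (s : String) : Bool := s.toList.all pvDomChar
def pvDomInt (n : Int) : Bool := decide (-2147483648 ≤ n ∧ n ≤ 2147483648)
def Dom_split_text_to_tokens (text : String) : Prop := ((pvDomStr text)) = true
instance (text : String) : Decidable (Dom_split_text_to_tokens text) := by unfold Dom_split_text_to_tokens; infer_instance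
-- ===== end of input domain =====

-- B replaces A's fused char-by-char scan plus while-remove('') cleanup by split-on-space,
-- per-segment letter filtering, and appending only non-empty tokens (objective: simpler).

-- ===== PORT A =====
-- A's letter test: 65 <= ord(i) <= 90 or 97 <= ord(i) <= 122
def pvIsLetter (c : Char) : Bool :=
  (65 ≤ c.toNat && c.toNat ≤ 90) || (97 ≤ c.toNat && c.toNat ≤ 122)

-- A's loop body: space flushes tmp_str, letters are appended, everything else is skipped
def pvStepA (st : List String × List Char) (i : Char) : List String × List Char :=
  if i.toNat = 32 then (st.1 ++ [String.ofList st.2], [])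
  else if pvIsLetter i then (st.1, st.2 ++ [i]) else st

-- A's trailing `final_lst.append(tmp_str)`
def pvFinishA (s : List String × List Char) : List String := s.1 ++ [String.ofList s.2]

-- the `while '' in final_lst: final_lst.remove('')` loop, step for step
def pvWhileRemoveEmpty (l : List String) : List String :=
  if h : "" ∈ l then pvWhileRemoveEmpty ((PySem.List.remove? l "").getD l) else l
termination_by l.length
decreasing_by
  rw [PySem.List.remove?_eq_some_erase l "" h]
  have h1 := List.length_erase_of_mem h
  have h2 := List.length_pos_of_mem h
  simp [h1]; omega

def split_text_to_tokens (text : String) : List String :=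
  pvWhileRemoveEmpty (pvFinishA (text.toList.foldl pvStepA ([], [])))

-- ===== PORT B =====
-- B's loop body: clean the segment to its ASCII letters, append it only if non-empty
def pvStepB (acc : List String) (seg : List Char) : List String :=
  if (seg.filter pvIsLetter).isEmpty then acc
  else acc ++ [String.ofList (seg.filter pvIsLetter)]

def split_text_to_tokens_alt (text : String) : List String :=
  (PySem.Chars.splitOn text.toList [' ']).foldl pvStepB []

-- ===== PRECONDITION & SPEC =====
def Spec_split_text_to_tokens (text : String) (out : List String) : Prop := out = split_text_to_tokens_alt text
instance (text : String) (out : List String) : Decidable (Spec_split_text_to_tokens text out) := by unfold Spec_split_text_to_tokens; infer_instance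

-- ===== CLAIM (what is proved, stated in full; the proofs are below) =====
def Claim_equal_split_text_to_tokens : Prop := ∀ (text : String), Dom_split_text_to_tokens text → Spec_split_text_to_tokens text (split_text_to_tokens text)

-- ===== LEMMAS AND PROOFS =====

-- reference form of splitting on ' ' with the current segment kept in order
def pvSegs : List Char → List Char → List (List Char)
  | [], cur => [cur]
  | c :: rest, cur => if c = ' ' then cur :: pvSegs rest [] else pvSegs rest (cur ++ [c])

-- reference form of A's scan (flush on space, keep letters) with the state made explicit
def pvASegs : List Char → List Char → List String
  | [], cur => [String.ofList cur]
  | c :: rest, cur =>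
      if c.toNat = 32 then String.ofList cur :: pvASegs rest []
      else if pvIsLetter c then pvASegs rest (cur ++ [c]) else pvASegs rest cur

theorem pvFoldA_eq (cs : List Char) : ∀ (acc : List String) (cur : List Char),
    pvFinishA (cs.foldl pvStepA (acc, cur)) = acc ++ pvASegs cs cur := by
  induction cs with
  | nil => intro acc cur; simp [pvFinishA, pvASegs]
  | cons c rest ih =>
    intro acc cur
    by_cases h32 : c.toNat = 32
    · simp only [List.foldl_cons, pvStepA, pvASegs, if_pos h32]
      rw [ih]; simp
    · by_cases hl : pvIsLetter c
      · simp only [List.foldl_cons, pvStepA, pvASegs, if_neg h32, if_pos hl]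
        exact ih acc (cur ++ [c])
      · simp only [List.foldl_cons, pvStepA, pvASegs, if_neg h32, if_neg hl]
        exact ih acc cur

theorem pvGo_eq (fuel : Nat) : ∀ (l cur : List Char) (acc : List (List Char)),
    l.length < fuel →
    PySem.Chars.splitOn.go [' '] fuel l cur acc = acc.reverse ++ pvSegs l cur.reverse := by
  induction fuel with
  | zero => intro l cur acc h; omega
  | succ fuel ih =>
    intro l cur acc h
    cases l with
    | nil => simp [PySem.Chars.splitOn.go, pvSegs]
    | cons c rest =>
      by_cases hc : c = ' '
      · have hpre : List.isPrefixOf [' '] (c :: rest) = true := by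
          simp [List.isPrefixOf, hc]
        simp only [PySem.Chars.splitOn.go, hpre, if_true]
        rw [show List.drop (List.length [' ']) (c :: rest) = rest from rfl]
        rw [ih rest [] _ (by simpa using Nat.lt_of_succ_lt_succ h)]
        simp [pvSegs, hc]
      · have hpre : List.isPrefixOf [' '] (c :: rest) = false := by
          simp [List.isPrefixOf]
          exact fun h' => hc h'.symm
        simp only [PySem.Chars.splitOn.go, hpre, Bool.false_eq_true, if_false]
        rw [ih rest (c :: cur) acc (by simpa using Nat.lt_of_succ_lt_succ h)]
        simp [pvSegs, hc]

theorem pvSplitOn_eq (cs : List Char) :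
    PySem.Chars.splitOn cs [' '] = pvSegs cs [] := by
  have := pvGo_eq (cs.length + 1) cs [] [] (by omega)
  simpa [PySem.Chars.splitOn] using this

theorem pvASegs_eq (cs : List Char) : ∀ (cur : List Char),
    pvASegs cs (cur.filter pvIsLetter)
      = (pvSegs cs cur).map (fun seg => String.ofList (seg.filter pvIsLetter)) := by
  induction cs with
  | nil => intro cur; simp [pvASegs, pvSegs]
  | cons c rest ih =>
    intro cur
    by_cases h32 : c.toNat = 32
    · have hc : c = ' ' := Char.ext (UInt32.toNat_inj.mp h32)
      subst hc
      simp only [pvASegs, pvSegs, if_pos h32, if_true, List.map_cons]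
      have ih0 := ih []
      simp only [List.filter_nil] at ih0
      simp [ih0]
    · have hc : c ≠ ' ' := fun he => h32 (by rw [he]; rfl)
      by_cases hl : pvIsLetter c
      · simp only [pvASegs, pvSegs, if_neg h32, if_pos hl, if_neg hc]
        have hfc : List.filter pvIsLetter cur ++ [c] = List.filter pvIsLetter (cur ++ [c]) := by
          simp [hl]
        rw [hfc, ih (cur ++ [c])]
      · simp only [pvASegs, pvSegs, if_neg h32, if_neg hl, if_neg hc]
        have hfc : List.filter pvIsLetter cur = List.filter pvIsLetter (cur ++ [c]) := by
          simp [hl]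
        rw [hfc, ih (cur ++ [c])]

theorem pvFilterErase (l : List String) :
    (l.erase "").filter (· ≠ "") = l.filter (· ≠ "") := by
  induction l with
  | nil => rfl
  | cons a l ih =>
    by_cases ha : a = ""
    · simp [ha]
    · have he : (a :: l).erase "" = a :: l.erase "" := List.erase_cons_tail (by simpa using ha)
      rw [he, List.filter_cons, List.filter_cons, ih]

theorem pvWRE_filter (l : List String) : pvWhileRemoveEmpty l = l.filter (· ≠ "") := by
  unfold pvWhileRemoveEmpty
  split_ifs with h
  · rw [PySem.List.remove?_eq_some_erase l "" h, Option.getD_some,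
      pvWRE_filter (l.erase "")]
    exact pvFilterErase l
  · symm
    apply List.filter_eq_self.2
    intro a ha
    simp only [ne_eq, decide_eq_true_eq]
    intro he; exact h (he ▸ ha)
termination_by l.length
decreasing_by
  have h1 := List.length_erase_of_mem h
  have h2 := List.length_pos_of_mem h
  omega

theorem pvFoldB_eq (parts : List (List Char)) : ∀ (acc : List String),
    parts.foldl pvStepB acc
    = acc ++ ((parts.map (fun seg => String.ofList (seg.filter pvIsLetter))).filter (· ≠ "")) := by
  induction parts with
  | nil => intro acc; simp
  | cons seg rest ih =>
    intro acc
    by_cases he : (seg.filter pvIsLetter).isEmpty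
    · have hempty : String.ofList (seg.filter pvIsLetter) = "" := by
        rw [List.isEmpty_iff.1 he]
      simp only [List.foldl_cons, pvStepB, List.map_cons, List.filter_cons, he, if_true, hempty]
      rw [ih]
      simp
    · have hne : String.ofList (seg.filter pvIsLetter) ≠ "" := by
        intro hcontr
        have h0 : seg.filter pvIsLetter = [] := by
          have := congrArg String.toList hcontr
          simpa using this
        exact he (by simp [h0])
      simp only [List.foldl_cons, pvStepB, List.map_cons, List.filter_cons, he,
        Bool.false_eq_true, if_false]
      rw [ih]
      simp [hne]

-- ===== VERDICT (by name: the statement is the Claim_ definition above) =====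
theorem split_text_to_tokens_spec : Claim_equal_split_text_to_tokens := by
  intro text _
  unfold Spec_split_text_to_tokens split_text_to_tokens split_text_to_tokens_alt
  rw [pvFoldA_eq text.toList [] [], List.nil_append, pvWRE_filter,
    pvSplitOn_eq, pvFoldB_eq, List.nil_append]
  have h := pvASegs_eq text.toList []
  simp only [List.filter_nil] at h
  rw [h]
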